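-- pv_equiv track=rewrite | github.com/serembon/Codewars-Python-Kata | Simple Encryption #1 - Alternating Split.py | decrypt1
-- ===== SOURCE A (Python) =====
-- def decrypt1(encrypted_text, n):
--     if n <= 0:
--         return encrypted_text
--     text_list = list(encrypted_text)
--     length = len(text_list)
--     if length % 2 == 0:
--         split_on = length // 2
--     else:
--         split_on = (length - 1) // 2
--     first = text_list[0:split_on]
--     second = text_list[split_on:length]
--
--     result_list = [second[i // 2] if i % 2 == 0 else first[(i - 1) // 2] for i in range(0, length)]
--     result = ''.join(result_list)
--     return decrypt1(result, n - 1)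
-- ===== SOURCE B (Python) =====
-- def decrypt1(encrypted_text, n):
--     t = encrypted_text
--     L = len(t)
--     split = L // 2
--     # one decryption round sends position i to the character at source index p[i]
--     p = [split + i // 2 if i % 2 == 0 else (i - 1) // 2 for i in range(L)]
--     # compose p with itself n times by binary exponentiation: q = p^n
--     q = list(range(L))
--     base = p
--     m = n
--     while m > 0:
--         if m % 2 == 1:
--             q = [base[j] for j in q]
--         base = [base[j] for j in base]
--         m //= 2
--     return ''.join(t[j] for j in q)
-- ===== Notes on version B (the rewrite author's own statement) =====
-- stated objective: faster
-- what changed: Instead of performing n full decryption rounds over the string, B builds the one-round index permutation once and raises it to the n-th power by binary exponentiation of array composition, then applies the composed permutation in a single pass.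
-- outside the precondition, e.g. on decrypt1('ab', 950): A returns 'ab', B returns 'ab'
import Mathlib
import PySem

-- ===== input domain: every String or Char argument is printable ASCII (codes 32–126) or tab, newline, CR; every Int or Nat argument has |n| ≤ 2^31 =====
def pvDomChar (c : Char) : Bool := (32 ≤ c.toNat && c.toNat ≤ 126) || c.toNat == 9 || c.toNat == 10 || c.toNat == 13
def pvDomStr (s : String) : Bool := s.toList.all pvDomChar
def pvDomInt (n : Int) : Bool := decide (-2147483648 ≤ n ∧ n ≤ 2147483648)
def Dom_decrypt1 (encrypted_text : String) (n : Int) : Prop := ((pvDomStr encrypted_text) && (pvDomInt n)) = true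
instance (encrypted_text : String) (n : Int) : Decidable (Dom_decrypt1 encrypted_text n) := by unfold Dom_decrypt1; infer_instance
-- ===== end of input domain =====

-- B replaces A's n decryption rounds over the string by one index permutation raised to the
-- n-th power via binary exponentiation and applied once (objective: faster, O(L log n) vs O(n·L)).


-- ===== PORT A =====
-- Literal port of A. List indexing uses PySem.List.pyGetD: the comprehension's indices are
-- always in range (proved in the lemmas below), so Python never raises IndexError here.
def decrypt1 (encrypted_text : String) (n : Int) : String :=
  if n ≤ 0 then encrypted_text
  else
    let text_list := encrypted_text.toList
    let length : Int := text_list.length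
    let split_on : Int :=
      if PySem.Int.mod length 2 == 0 then PySem.Int.floordiv length 2
      else PySem.Int.floordiv (length - 1) 2
    let first := PySem.List.slice text_list (some 0) (some split_on)
    let second := PySem.List.slice text_list (some split_on) (some length)
    let result_list := (PySem.List.pyRange 0 length 1).map (fun i =>
      if PySem.Int.mod i 2 == 0 then PySem.List.pyGetD second (PySem.Int.floordiv i 2) ' '
      else PySem.List.pyGetD first (PySem.Int.floordiv (i - 1) 2) ' ')
    decrypt1 (String.ofList result_list) (n - 1)
termination_by n.toNat
decreasing_by omega

-- ===== PORT B =====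
-- Port of Source B. The index arrays hold Python ints that are provably 0 ≤ · (list positions),
-- so they are represented as List Nat; `[base[j] for j in q]` is pvComp (indices always in
-- range, proved below). The `while m > 0` loop is pvPowLoop, recursing on m = n.toNat
-- (for n ≤ 0 the Python loop body never runs, exactly like fuel 0).
def pvComp (base q : List Nat) : List Nat := q.map (fun j => base.getD j 0)

def pvPowLoop (base q : List Nat) (m : Nat) : List Nat :=
  if m = 0 then q
  else pvPowLoop (pvComp base base) (if m % 2 = 1 then pvComp base q else q) (m / 2)
termination_by m
decreasing_by omega

def decrypt1_alt (encrypted_text : String) (n : Int) : String :=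
  let t := encrypted_text.toList
  let L := t.length
  let split := L / 2
  let p := (List.range L).map (fun i => if i % 2 = 0 then split + i / 2 else (i - 1) / 2)
  let q := pvPowLoop p (List.range L) n.toNat
  String.ofList (q.map (fun j => t.getD j ' '))

-- ===== PRECONDITION & SPEC =====
-- Pre_ excludes large positive n, on which the Python A (recursion depth = n, CPython's
-- recursion limit ≈ 1000) raises RecursionError; the bound 900 leaves a safety margin for
-- interpreter stack state, so it also excludes some n on which A still returns (the
-- equivalence itself is proved for ALL n — the proof does not use the bound).
def Pre_decrypt1 (encrypted_text : String) (n : Int) : Prop := n ≤ 900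
instance (encrypted_text : String) (n : Int) : Decidable (Pre_decrypt1 encrypted_text n) := by
  unfold Pre_decrypt1; infer_instance

def pvWitness_decrypt1 : String × Int := ("hskt svr neetn!Ti aai eyitrsig", 2)

def Spec_decrypt1 (encrypted_text : String) (n : Int) (out : String) : Prop := out = decrypt1_alt encrypted_text n
instance (encrypted_text : String) (n : Int) (out : String) : Decidable (Spec_decrypt1 encrypted_text n out) := by unfold Spec_decrypt1; infer_instance

-- ===== CLAIM (what is proved, stated in full; the proofs are below) =====
def Claim_equal_decrypt1 : Prop := ∀ (encrypted_text : String) (n : Int), Dom_decrypt1 encrypted_text n → Pre_decrypt1 encrypted_text n → Spec_decrypt1 encrypted_text n (decrypt1 encrypted_text n)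

-- ===== LEMMAS AND PROOFS =====

-- The one-round source-index map: after one decryption round, position i holds the
-- character that was at position pvP L i.
def pvP (L i : Nat) : Nat := if i % 2 = 0 then L / 2 + i / 2 else (i - 1) / 2

theorem pvP_lt {L i : Nat} (h : i < L) : pvP L i < L := by
  unfold pvP; split <;> omega

theorem pvP_iter_lt {L : Nat} (k : Nat) {i : Nat} (h : i < L) : (pvP L)^[k] i < L := by
  induction k generalizing i with
  | zero => simpa
  | succ k ih => rw [Function.iterate_succ_apply]; exact ih (pvP_lt h)

theorem range_map_getD (l : List Char) (d : Char) :
    (List.range l.length).map (fun i => l.getD i d) = l := by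
  apply List.ext_getElem <;> intros <;>
    simp_all [List.getD_eq_getElem?_getD]

theorem fd_two_cast (L : Nat) : PySem.Int.floordiv (L:Int) 2 = ((L / 2 : Nat) : Int) := by
  rw [PySem.Int.floordiv_eq_ediv_of_pos (by norm_num)]
  exact Eq.symm (Nat.ToInt.div_congr rfl rfl)

-- one round of A equals the permutation map
theorem decrypt1_step (s : String) (n : Int) (hn : ¬ n ≤ 0) :
    decrypt1 s n =
      decrypt1
        (String.ofList ((List.range s.toList.length).map
          (fun i => s.toList.getD (pvP s.toList.length i) ' '))) (n - 1) := by
  conv_lhs => rw [decrypt1, if_neg hn]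
  dsimp only
  congr 2
  have hsplit : (if (PySem.Int.mod (s.toList.length:Int) 2 == 0) = true
      then PySem.Int.floordiv (s.toList.length:Int) 2
      else PySem.Int.floordiv ((s.toList.length:Int) - 1) 2)
      = ((s.toList.length / 2 : Nat) : Int) := by
    set L := s.toList.length
    by_cases hp : L % 2 = 0
    · rw [if_pos (by simp; omega), fd_two_cast]
    · have hL1 : (L:Int) - 1 = ((L - 1 : Nat) : Int) := by omega
      rw [if_neg (by simp; omega), hL1, fd_two_cast]
      congr 1
      omega
  rw [hsplit]
  set t := s.toList with ht
  set L := t.length with hL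
  have hfirst : PySem.List.slice t (some 0) (some ((L/2 : Nat) : Int)) = t.take (L/2) := by
    rw [PySem.List.slice_zero_start, PySem.List.slice_to_natCast]
  have hsecond : PySem.List.slice t (some ((L/2 : Nat) : Int)) (some (L:Int)) = t.drop (L/2) := by
    rw [PySem.List.slice_natCast]
    apply List.take_of_length_le
    simp [hL]
  rw [hfirst, hsecond, PySem.List.pyRange_zero_natCast, List.map_map]
  apply List.map_congr_left
  intro i hi
  have hiL : i < L := List.mem_range.mp hi
  simp only [Function.comp_apply]
  by_cases hp : i % 2 = 0
  · rw [if_pos (by simp; omega), fd_two_cast, PySem.List.pyGetD_natCast]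
    simp [List.getD_eq_getElem?_getD, List.getElem?_drop, pvP, hp]
  · have h1 : (i:Int) - 1 = ((i - 1 : Nat) : Int) := by omega
    rw [if_neg (by simp; omega), h1, fd_two_cast, PySem.List.pyGetD_natCast]
    have hlt : (i-1)/2 < L/2 := by omega
    simp [List.getD_eq_getElem?_getD, hlt, pvP, hp]

-- closed form of A
theorem decrypt1_char (k : Nat) : ∀ (n : Int), n.toNat = k → ∀ (s : String),
    decrypt1 s n =
      String.ofList ((List.range s.toList.length).map
        (fun i => s.toList.getD ((pvP s.toList.length)^[k] i) ' ')) := by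
  induction k with
  | zero =>
    intro n hk s
    rw [decrypt1, if_pos (by omega)]
    simp only [Function.iterate_zero, id]
    rw [range_map_getD]
    exact (String.ofList_eq.mpr rfl).symm
  | succ k ih =>
    intro n hk s
    have hn : ¬ n ≤ 0 := by omega
    rw [decrypt1_step s n hn]
    have hk' : (n - 1).toNat = k := by omega
    rw [ih (n - 1) hk' _]
    have htl : (String.ofList ((List.range s.toList.length).map
        (fun i => s.toList.getD (pvP s.toList.length i) ' '))).toList
        = (List.range s.toList.length).map
            (fun i => s.toList.getD (pvP s.toList.length i) ' ') := String.toList_ofList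
    rw [htl]
    congr 1
    rw [List.length_map, List.length_range]
    apply List.map_congr_left
    intro i hi
    have hiL : i < s.toList.length := List.mem_range.mp hi
    rw [PySem.List.getD_map_range _ _ _ _ (pvP_iter_lt k hiL),
      ← Function.iterate_succ_apply' (pvP s.toList.length) k i]

-- pvComp on arrays of in-range functions is composition
theorem pvComp_map (L : Nat) (f g : Nat → Nat) (hg : ∀ i < L, g i < L) :
    pvComp ((List.range L).map f) ((List.range L).map g) =
      (List.range L).map (fun i => f (g i)) := by
  unfold pvComp
  rw [List.map_map]
  apply List.map_congr_left
  intro i hi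
  simpa using PySem.List.getD_map_range f L (g i) 0 (hg i (List.mem_range.mp hi))

-- the binary-exponentiation loop computes the m-th iterate
theorem iter_sq (f : Nat → Nat) (k x : Nat) : (fun i => f (f i))^[k] x = f^[2*k] x := by
  rw [Function.iterate_mul]
  congr 1

theorem pvPowLoop_spec (L : Nat) : ∀ (m : Nat) (f g : Nat → Nat),
    (∀ i < L, f i < L) → (∀ i < L, g i < L) →
    pvPowLoop ((List.range L).map f) ((List.range L).map g) m =
      (List.range L).map (fun i => f^[m] (g i)) := by
  intro m
  induction m using Nat.strong_induction_on with
  | _ m ih =>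
    intro f g hf hg
    by_cases hm : m = 0
    · subst hm; rw [pvPowLoop]; simp
    · rw [pvPowLoop, if_neg hm]
      have hff : ∀ i < L, f (f i) < L := fun i hi => hf _ (hf i hi)
      have hcb : pvComp ((List.range L).map f) ((List.range L).map f) =
          (List.range L).map (fun i => f (f i)) := pvComp_map L f f hf
      by_cases hpar : m % 2 = 1
      · rw [if_pos hpar, hcb, pvComp_map L f g hg,
          ih (m/2) (by omega) _ _ hff (fun i hi => hf _ (hg i hi))]
        apply List.map_congr_left
        intro i _
        calc (fun j => f (f j))^[m/2] (f (g i))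
            = f^[2*(m/2)] (f (g i)) := iter_sq f (m/2) (f (g i))
          _ = f^[2*(m/2)+1] (g i) := by
              rw [Function.iterate_add_apply, Function.iterate_one]
          _ = f^[m] (g i) := by congr 1; omega
      · rw [if_neg hpar, hcb, ih (m/2) (by omega) _ _ hff hg]
        apply List.map_congr_left
        intro i _
        rw [iter_sq]
        congr 1
        omega

-- closed form of B
theorem decrypt1_alt_char (s : String) (n : Int) :
    decrypt1_alt s n =
      String.ofList ((List.range s.toList.length).map
        (fun i => s.toList.getD ((pvP s.toList.length)^[n.toNat] i) ' ')) := by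
  unfold decrypt1_alt
  dsimp only
  have hp : (List.range s.toList.length).map
      (fun i => if i % 2 = 0 then s.toList.length / 2 + i / 2 else (i - 1) / 2)
      = (List.range s.toList.length).map (pvP s.toList.length) := by
    apply List.map_congr_left
    intro i _
    rfl
  have hspec := pvPowLoop_spec s.toList.length n.toNat (pvP s.toList.length) (fun i => i)
    (fun i hi => pvP_lt hi) (fun i hi => hi)
  simp only [List.map_id_fun', id] at hspec
  rw [hp, hspec, List.map_map]
  rfl

-- ===== VERDICT (by name: the statement is the Claim_ definition above) =====
theorem decrypt1_spec : Claim_equal_decrypt1 := by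
  intro s n _ _
  unfold Spec_decrypt1
  rw [decrypt1_char n.toNat n rfl s, decrypt1_alt_char]
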